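-- pv_equiv track=rewrite | github.com/ofekavidan/Intro-to-CS-HUJI-Python- | Exercise05/main.py | return_w_diagonal
-- ===== SOURCE A (Python) =====
-- def return_w_diagonal(matrix):
--     """This function gets a matrix and returns string of its w diagonal"""
--     col = len(matrix[0])
--     row = len(matrix)
--     fdiag = [[] for _ in range(row + col - 1)]
--     bdiag = [[] for _ in range(len(fdiag))]
--     min_bdiag = -row + 1
--
--     fdiag_str = ""
--
--     for x in range(col):
--         for y in range(row):
--             fdiag[x + y].append(matrix[y][x])
--             bdiag[x - y - min_bdiag].append(matrix[y][x])
--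
--     for i in fdiag:
--         for j in i:
--             fdiag_str += str(j)
--         fdiag_str += "\n"
--
--     return (fdiag_str)
-- ===== SOURCE B (Python) =====
-- def return_w_diagonal(matrix):
--     """Emit each forward diagonal directly (no bucket lists): for diagonal d,
--     scan x ascending and take matrix[d-x][x] when the row index is in range."""
--     col = len(matrix[0])
--     row = len(matrix)
--     out = []
--     for d in range(row + col - 1):
--         line = "".join(str(matrix[d - x][x]) for x in range(col) if 0 <= d - x < row)
--         out.append(line + "\n")
--     return "".join(out)
-- ===== Notes on version B (the rewrite author's own statement) =====
-- stated objective: simpler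
-- what changed: B drops A's fdiag/bdiag bucket-list construction entirely and emits each forward diagonal directly: for each diagonal index d it scans x ascending and takes matrix[d-x][x] when 0 <= d-x < row, joining the pieces.
import Mathlib
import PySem

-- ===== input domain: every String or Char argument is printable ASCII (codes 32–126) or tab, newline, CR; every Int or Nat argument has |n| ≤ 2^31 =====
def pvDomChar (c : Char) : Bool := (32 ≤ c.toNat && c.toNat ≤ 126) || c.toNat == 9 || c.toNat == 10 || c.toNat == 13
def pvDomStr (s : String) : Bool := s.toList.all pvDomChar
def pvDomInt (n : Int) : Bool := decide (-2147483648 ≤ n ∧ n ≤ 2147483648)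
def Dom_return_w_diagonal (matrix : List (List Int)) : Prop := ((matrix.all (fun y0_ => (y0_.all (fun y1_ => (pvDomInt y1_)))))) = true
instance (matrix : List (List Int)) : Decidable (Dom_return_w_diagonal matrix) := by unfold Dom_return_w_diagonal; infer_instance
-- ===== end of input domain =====

-- B emits each forward diagonal directly (scanning x ascending per diagonal index d)
-- instead of A's two bucket lists filled by a column-major double loop; objective: simpler.

-- ===== PORT A =====
-- Literal port of A: fill fdiag/bdiag buckets over x ∈ range(col), y ∈ range(row),
-- then concatenate.  matrix[y][x] is in range under Pre_, ported as getD with default 0.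
def return_w_diagonal (matrix : List (List Int)) : String :=
  let col := (matrix.headD []).length
  let row := matrix.length
  let fdiag0 : List (List Int) := (List.range (row + col - 1)).map (fun _ => [])
  let bdiag0 : List (List Int) := (List.range fdiag0.length).map (fun _ => [])
  -- min_bdiag = -row + 1, so the bdiag index x - y - min_bdiag = x + row - 1 - y
  let st :=
    (List.range col).foldl
      (fun st x =>
        (List.range row).foldl
          (fun (st : List (List Int) × List (List Int)) y =>
            let v := (matrix.getD y []).getD x 0
            (st.1.set (x + y) (st.1.getD (x + y) [] ++ [v]),
             st.2.set (x + row - 1 - y) (st.2.getD (x + row - 1 - y) [] ++ [v])))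
          st)
      (fdiag0, bdiag0)
  let fdiag_str :=
    st.1.foldl (fun s i => (i.foldl (fun s j => s ++ PySem.Int.toStr j) s) ++ "\n") ""
  fdiag_str

-- ===== PORT B =====
-- Literal port of B: for each diagonal d, join str(matrix[d-x][x]) over x with 0 ≤ d-x < row.
def return_w_diagonal_alt (matrix : List (List Int)) : String :=
  let col := (matrix.headD []).length
  let row := matrix.length
  let out :=
    (List.range (row + col - 1)).foldl
      (fun (out : List String) (d : Nat) =>
        let line := String.join ((List.range col).filterMap (fun (x : Nat) =>
          let y : Int := (d : Int) - (x : Int)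
          if 0 ≤ y ∧ y < (row : Int) then
            some (PySem.Int.toStr ((matrix.getD y.toNat []).getD x 0))
          else none))
        out ++ [line ++ "\n"])
      []
  String.join out

-- ===== PRECONDITION & SPEC =====
-- Pre_: exactly where Python A returns: matrix nonempty and every row at least as
-- long as the first (otherwise matrix[0] or matrix[y][x] raises IndexError).
def Pre_return_w_diagonal (matrix : List (List Int)) : Prop :=
  matrix ≠ [] ∧ ∀ r ∈ matrix, (matrix.headD []).length ≤ r.length
instance (matrix : List (List Int)) : Decidable (Pre_return_w_diagonal matrix) := by
  unfold Pre_return_w_diagonal; infer_instance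
def pvWitness_return_w_diagonal : List (List Int) := [[1, 2], [3, 4]]
def Spec_return_w_diagonal (matrix : List (List Int)) (out : String) : Prop := out = return_w_diagonal_alt matrix
instance (matrix : List (List Int)) (out : String) : Decidable (Spec_return_w_diagonal matrix out) := by unfold Spec_return_w_diagonal; infer_instance

-- ===== CLAIM (what is proved, stated in full; the proofs are below) =====
def Claim_equal_return_w_diagonal : Prop := ∀ (matrix : List (List Int)), Dom_return_w_diagonal matrix → Pre_return_w_diagonal matrix → Spec_return_w_diagonal matrix (return_w_diagonal matrix)

-- ===== LEMMAS AND PROOFS =====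

-- the value A/B read at column x, diagonal d
def pvVal (matrix : List (List Int)) (x d : Nat) : Int := (matrix.getD (d - x) []).getD x 0

-- the contents of forward diagonal d (increasing x)
def pvDiag (matrix : List (List Int)) (col row d : Nat) : List Int :=
  (List.range col).filterMap (fun x =>
    if x ≤ d ∧ d - x < row then some (pvVal matrix x d) else none)

-- inner y-loop: pointwise effect on the fdiag component
theorem inner_loop_getD (matrix : List (List Int)) (x k : Nat)
    (st : List (List Int) × List (List Int)) (hk : x + k ≤ st.1.length) (d : Nat) :
    (((List.range k).foldl
        (fun (st : List (List Int) × List (List Int)) y =>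
          let v := (matrix.getD y []).getD x 0
          (st.1.set (x + y) (st.1.getD (x + y) [] ++ [v]),
           st.2.set (x + matrix.length - 1 - y) (st.2.getD (x + matrix.length - 1 - y) [] ++ [v])))
        st).1.getD d [] =
      st.1.getD d [] ++ (if x ≤ d ∧ d - x < k then [pvVal matrix x d] else [])) ∧
    (((List.range k).foldl
        (fun (st : List (List Int) × List (List Int)) y =>
          let v := (matrix.getD y []).getD x 0
          (st.1.set (x + y) (st.1.getD (x + y) [] ++ [v]),
           st.2.set (x + matrix.length - 1 - y) (st.2.getD (x + matrix.length - 1 - y) [] ++ [v])))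
        st).1.length = st.1.length) := by
  induction k generalizing st with
  | zero => exact ⟨by simp, by simp⟩
  | succ k ih =>
    rw [List.range_succ, List.foldl_append]
    have hk' : x + k ≤ st.1.length := by omega
    obtain ⟨ihg, ihl⟩ := ih st hk'
    set F := ((List.range k).foldl
        (fun (st : List (List Int) × List (List Int)) y =>
          let v := (matrix.getD y []).getD x 0
          (st.1.set (x + y) (st.1.getD (x + y) [] ++ [v]),
           st.2.set (x + matrix.length - 1 - y) (st.2.getD (x + matrix.length - 1 - y) [] ++ [v])))
        st) with hF
    constructor
    · simp only [List.foldl_cons, List.foldl_nil]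
      by_cases hd : d = x + k
      · subst hd
        have hin : x + k < F.1.length := by omega
        rw [List.getD_eq_getElem?_getD, List.getElem?_set_self hin, Option.getD_some, ihg]
        have h1 : ¬(x ≤ x + k ∧ x + k - x < k) := by omega
        have h2 : x ≤ x + k ∧ x + k - x < k + 1 := by omega
        rw [if_neg h1, if_pos h2]
        simp [pvVal]
      · rw [List.getD_eq_getElem?_getD, List.getElem?_set_ne (by omega), ← List.getD_eq_getElem?_getD, ihg]
        have h1 : (x ≤ d ∧ d - x < k + 1) ↔ (x ≤ d ∧ d - x < k) := by omega
        rw [if_congr h1 rfl rfl]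
    · simp only [List.foldl_cons, List.foldl_nil]
      simp [ihl]

-- outer x-loop: pointwise characterisation of the final fdiag
theorem outer_loop_getD (matrix : List (List Int)) (c : Nat)
    (st : List (List Int) × List (List Int))
    (hc : ∀ x < c, x + matrix.length ≤ st.1.length) (d : Nat) :
    (((List.range c).foldl
        (fun st x =>
          (List.range matrix.length).foldl
            (fun (st : List (List Int) × List (List Int)) y =>
              let v := (matrix.getD y []).getD x 0
              (st.1.set (x + y) (st.1.getD (x + y) [] ++ [v]),
               st.2.set (x + matrix.length - 1 - y) (st.2.getD (x + matrix.length - 1 - y) [] ++ [v])))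
            st)
        st).1.getD d [] = st.1.getD d [] ++ pvDiag matrix c matrix.length d) ∧
    (((List.range c).foldl
        (fun st x =>
          (List.range matrix.length).foldl
            (fun (st : List (List Int) × List (List Int)) y =>
              let v := (matrix.getD y []).getD x 0
              (st.1.set (x + y) (st.1.getD (x + y) [] ++ [v]),
               st.2.set (x + matrix.length - 1 - y) (st.2.getD (x + matrix.length - 1 - y) [] ++ [v])))
            st)
        st).1.length = st.1.length) := by
  induction c generalizing st with
  | zero => simp [pvDiag]
  | succ c ih =>
    rw [List.range_succ, List.foldl_append]
    obtain ⟨ihg, ihl⟩ := ih st (fun x hx => hc x (by omega))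
    set F := ((List.range c).foldl
        (fun st x =>
          (List.range matrix.length).foldl
            (fun (st : List (List Int) × List (List Int)) y =>
              let v := (matrix.getD y []).getD x 0
              (st.1.set (x + y) (st.1.getD (x + y) [] ++ [v]),
               st.2.set (x + matrix.length - 1 - y) (st.2.getD (x + matrix.length - 1 - y) [] ++ [v])))
            st)
        st) with hF
    simp only [List.foldl_cons, List.foldl_nil]
    have hin : c + matrix.length ≤ F.1.length := by
      rw [ihl]; exact hc c (by omega)
    obtain ⟨g1, l1⟩ := inner_loop_getD matrix c matrix.length F hin d
    constructor
    · rw [g1, ihg, List.append_assoc]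
      congr 1
      rw [pvDiag, pvDiag, List.range_succ, List.filterMap_append]
      congr 1
      by_cases h : c ≤ d ∧ d - c < matrix.length <;> simp [h]
    · rw [l1, ihl]

-- string flattening: A's foldl over buckets = join of per-bucket strings
theorem str_join_foldl (l : List String) (a : String) :
    l.foldl (fun r s => r ++ s) a = a ++ String.join l := by
  induction l generalizing a with
  | nil => simp [String.join]
  | cons b t ih =>
    show List.foldl _ (a ++ b) t = a ++ String.join (b :: t)
    rw [ih]
    have hjc : String.join (b :: t) = b ++ String.join t := by
      show List.foldl _ ("" ++ b) t = _
      rw [String.empty_append, ih]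
    rw [hjc, String.append_assoc]

theorem str_join_cons (b : String) (t : List String) :
    String.join (b :: t) = b ++ String.join t := by
  show List.foldl _ ("" ++ b) t = _
  rw [String.empty_append, str_join_foldl]

theorem inner_str (l : List Int) (s : String) :
    l.foldl (fun s j => s ++ PySem.Int.toStr j) s = s ++ String.join (l.map PySem.Int.toStr) := by
  rw [← List.foldl_map, str_join_foldl]

theorem outer_str (L : List (List Int)) (s : String) :
    L.foldl (fun s i => (i.foldl (fun s j => s ++ PySem.Int.toStr j) s) ++ "\n") s =
      s ++ String.join (L.map (fun i => String.join (i.map PySem.Int.toStr) ++ "\n")) := by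
  induction L generalizing s with
  | nil => simp [String.join]
  | cons a t ih =>
    simp only [List.foldl_cons, List.map_cons]
    rw [inner_str, ih, str_join_cons]
    simp [String.append_assoc]

-- B's list-building loop is a map
theorem foldl_concat_map {α β : Type} (f : α → β) (l : List α) (acc : List β) :
    l.foldl (fun out d => out ++ [f d]) acc = acc ++ l.map f := by
  induction l generalizing acc with
  | nil => simp
  | cons a t ih => simp [ih]

-- B's per-diagonal line = join of toStr over pvDiag
theorem line_eq (matrix : List (List Int)) (col row d : Nat) :
    String.join ((List.range col).filterMap (fun (x : Nat) =>
        let y : Int := (d : Int) - (x : Int)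
        if 0 ≤ y ∧ y < (row : Int) then
          some (PySem.Int.toStr ((matrix.getD y.toNat []).getD x 0))
        else none)) =
      String.join ((pvDiag matrix col row d).map PySem.Int.toStr) := by
  rw [pvDiag, List.map_filterMap]
  congr 1
  apply List.filterMap_congr
  intro x _
  by_cases h : x ≤ d ∧ d - x < row
  · have h1 : 0 ≤ (d : Int) - (x : Int) ∧ (d : Int) - (x : Int) < (row : Int) := by omega
    have h2 : ((d : Int) - (x : Int)).toNat = d - x := by omega
    show (if 0 ≤ (d : Int) - (x : Int) ∧ (d : Int) - (x : Int) < (row : Int) then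
        some (PySem.Int.toStr ((matrix.getD ((d : Int) - (x : Int)).toNat []).getD x 0))
      else none) = _
    rw [if_pos h1, if_pos h, h2]
    simp [pvVal]
  · have h1 : ¬(0 ≤ (d : Int) - (x : Int) ∧ (d : Int) - (x : Int) < (row : Int)) := by omega
    show (if 0 ≤ (d : Int) - (x : Int) ∧ (d : Int) - (x : Int) < (row : Int) then
        some (PySem.Int.toStr ((matrix.getD ((d : Int) - (x : Int)).toNat []).getD x 0))
      else none) = _
    rw [if_neg h1, if_neg h]
    rfl

-- ===== VERDICT (by name: the statement is the Claim_ definition above) =====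
theorem return_w_diagonal_spec : Claim_equal_return_w_diagonal := by
  intro matrix _hdom hpre
  obtain ⟨hne, hrows⟩ := hpre
  unfold Spec_return_w_diagonal return_w_diagonal return_w_diagonal_alt
  simp only []
  set col := (matrix.headD []).length with hcol
  set row := matrix.length with hrow
  have hrow1 : 1 ≤ row := by
    cases matrix with
    | nil => exact absurd rfl hne
    | cons a t => simp [hrow]
  set n := row + col - 1 with hn
  -- initial fdiag
  have hlen0 : ((List.range n).map (fun _ => ([] : List Int))).length = n := by simp
  have hget0 : ∀ d, ((List.range n).map (fun _ => ([] : List Int))).getD d [] = [] := by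
    intro d
    rcases Nat.lt_or_ge d n with h | h
    · rw [List.getD_eq_getElem?_getD]; simp [h]
    · rw [List.getD_eq_getElem?_getD, List.getElem?_eq_none (by simpa using h)]; rfl
  have hc : ∀ x < col, x + row ≤ ((List.range n).map (fun _ => ([] : List Int))).length := by
    intro x hx; rw [hlen0]; omega
  have hout := fun d => outer_loop_getD matrix col
    ((List.range n).map (fun _ => ([] : List Int)),
     (List.range ((List.range n).map (fun _ => ([] : List Int))).length).map (fun _ => ([] : List Int)))
    (by intro x hx; exact hc x hx) d

  -- final fdiag equals the list of diagonals
  set F := ((List.range col).foldl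
      (fun st x =>
        (List.range row).foldl
          (fun (st : List (List Int) × List (List Int)) y =>
            let v := (matrix.getD y []).getD x 0
            (st.1.set (x + y) (st.1.getD (x + y) [] ++ [v]),
             st.2.set (x + row - 1 - y) (st.2.getD (x + row - 1 - y) [] ++ [v])))
          st)
      ((List.range n).map (fun _ => ([] : List Int)),
       (List.range ((List.range n).map (fun _ => ([] : List Int))).length).map (fun _ => ([] : List Int)))) with hFdef
  have hFlen : F.1.length = n := by rw [(hout 0).2, hlen0]
  have hFget : ∀ d, F.1.getD d [] = pvDiag matrix col row d := by
    intro d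
    rw [(hout d).1, ← hrow]
    simp
  have hFeq : F.1 = (List.range n).map (fun d => pvDiag matrix col row d) := by
    apply List.ext_getElem
    · simp [hFlen]
    · intro i h1 h2
      have hi : i < n := by omega
      have := hFget i
      rw [List.getD_eq_getElem?_getD, List.getElem?_eq_getElem h1] at this
      simp at this
      simp [this]
  rw [outer_str, hFeq, foldl_concat_map]
  simp only [List.nil_append, String.empty_append, List.map_map]
  congr 1
  apply List.map_congr_left
  intro d _
  simp only [Function.comp_apply]
  rw [line_eq]
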